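-- pv_equiv track=rewrite | github.com/yihaozhong/LPractice | virtu.py | max_apple
-- ===== SOURCE A (Python) =====
-- def max_apple(A):
--     # return maximum apple that could fit in the box, A[0] is the capacility
--     cap = 5000 - A[0]
--     apples = A[1:]
--     apples.sort()
--     total, cnt = 0, 0
--
--     for a in apples:
--         if total + a <= cap:
--             total += a
--             cnt += 1
--         else:
--             break
--     return cnt
-- ===== SOURCE B (Python) =====
-- def max_apple(A):
--     # selection-based greedy: no sort; repeatedly extract the current minimum
--     # while it still fits the remaining capacity
--     cap = 5000 - A[0]
--     apples = A[1:]
--     total, cnt = 0, 0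
--     while apples:
--         m = min(apples)
--         if total + m > cap:
--             break
--         apples.remove(m)
--         total += m
--         cnt += 1
--     return cnt
-- ===== Notes on version B (the rewrite author's own statement) =====
-- stated objective: alternative
-- what changed: B never sorts: it is a selection-based greedy that repeatedly extracts the minimum of the remaining multiset (min + remove) while it fits, instead of A's sort-then-scan-with-break; correct because the k-th extracted minimum equals the k-th element of the sorted tail.
import Mathlib
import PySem

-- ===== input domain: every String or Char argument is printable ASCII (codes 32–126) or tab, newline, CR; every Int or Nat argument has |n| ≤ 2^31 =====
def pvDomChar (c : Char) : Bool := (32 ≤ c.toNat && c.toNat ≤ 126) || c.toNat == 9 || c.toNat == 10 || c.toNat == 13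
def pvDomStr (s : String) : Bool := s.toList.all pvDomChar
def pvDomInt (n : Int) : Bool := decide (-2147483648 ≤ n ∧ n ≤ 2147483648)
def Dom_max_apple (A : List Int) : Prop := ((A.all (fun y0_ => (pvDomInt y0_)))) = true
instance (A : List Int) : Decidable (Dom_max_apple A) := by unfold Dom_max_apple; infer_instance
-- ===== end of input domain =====

-- B replaces A's sort-then-scan-with-break by a selection-based greedy that
-- repeatedly extracts the minimum of the remaining list (alternative algorithm, no sort).
-- ===== PORT A =====
-- A's for-loop with break over the sorted tail, carrying (total, cnt)
def maxAppleLoopA (cap : Int) : List Int → Int → Int → Int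
  | [], _, cnt => cnt
  | a :: rest, total, cnt =>
    if total + a ≤ cap then maxAppleLoopA cap rest (total + a) (cnt + 1) else cnt

def max_apple (A : List Int) : Int :=
  let cap := 5000 - (PySem.List.pyGet? A 0).getD 0   -- A[0]; Pre_ excludes [] where Python raises IndexError
  let apples := PySem.List.sorted (A.drop 1) (fun x => x) false   -- A[1:] = drop 1 (exact for this slice), then sort
  maxAppleLoopA cap apples 0 0

-- ===== PORT B =====
-- Source B's while loop: m = min(apples); break if it overflows; apples.remove(m) (first
-- occurrence = List.erase, exact since m ∈ apples); total += m; cnt += 1.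
-- The Nat argument is fuel (initialised to the list length) that only guards totality:
-- each iteration removes one element, so it is never exhausted before the list is empty.
def selLoopB (cap : Int) : Nat → List Int → Int → Int → Int
  | 0, _, _, cnt => cnt
  | _ + 1, [], _, cnt => cnt                          -- while apples: loop ends
  | fuel + 1, x :: t, total, cnt =>
    let m := (PySem.List.min? (x :: t) (fun y => y)).getD 0   -- min(apples); nonempty, getD never used
    if total + m > cap then cnt
    else selLoopB cap fuel ((x :: t).erase m) (total + m) (cnt + 1)

def max_apple_alt (A : List Int) : Int :=
  let cap := 5000 - (PySem.List.pyGet? A 0).getD 0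
  selLoopB cap (A.drop 1).length (A.drop 1) 0 0

-- ===== PRECONDITION & SPEC =====
-- A raises IndexError on the empty list (A[0]); excluded.
def Pre_max_apple (A : List Int) : Prop := A ≠ []
instance (A : List Int) : Decidable (Pre_max_apple A) := by unfold Pre_max_apple; infer_instance
def pvWitness_max_apple : List Int := ([3, 1, 2])
def Spec_max_apple (A : List Int) (out : Int) : Prop := out = max_apple_alt A
instance (A : List Int) (out : Int) : Decidable (Spec_max_apple A out) := by unfold Spec_max_apple; infer_instance

-- ===== CLAIM (what is proved, stated in full; the proofs are below) =====
def Claim_equal_max_apple : Prop := ∀ (A : List Int), Dom_max_apple A → Pre_max_apple A → Spec_max_apple A (max_apple A)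

-- ===== LEMMAS AND PROOFS =====
-- Core invariant: extracting minima one by one traverses exactly the sorted list.
theorem selB_eq_loopA (cap : Int) : ∀ (fuel : ℕ) (xs : List Int), xs.length ≤ fuel →
    ∀ (total cnt : Int),
    selLoopB cap fuel xs total cnt = maxAppleLoopA cap (PySem.List.sorted xs (fun x => x) false) total cnt := by
  intro fuel
  induction fuel with
  | zero =>
    intro xs hx total cnt
    have hxs : xs = [] := List.eq_nil_of_length_eq_zero (by omega)
    subst hxs
    simp [selLoopB, PySem.List.sorted, maxAppleLoopA]
  | succ fuel ih =>
    intro xs hx total cnt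
    cases xs with
    | nil => simp [selLoopB, PySem.List.sorted, maxAppleLoopA]
    | cons b t =>
      rcases hs : PySem.List.sorted (b :: t) (fun x => x) false with _ | ⟨a, rest⟩
      · exact absurd ((PySem.List.sorted_eq_nil_iff _ _ _).mp hs) (by simp)
      · have hm : PySem.List.min? (b :: t) (fun y => y) = some (t.foldl min b) :=
          PySem.List.min?_id_cons ..
        have hmem : t.foldl min b ∈ b :: t := PySem.List.min?_mem hm
        have hma : t.foldl min b = a := by
          have hax : a ∈ b :: t := (PySem.List.mem_sorted _ _ _ _).mp
            (by rw [hs]; exact List.mem_cons_self ..)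
          have h1 : t.foldl min b ≤ a := PySem.List.min?_isMin hm a hax
          have h2 : a ≤ t.foldl min b :=
            PySem.List.key_head_sorted_le (b :: t) (fun x : Int => x) hs _ hmem
          omega
        rw [selLoopB]
        simp only [hm, Option.getD_some, hma, maxAppleLoopA]
        by_cases hc : total + a > cap
        · rw [if_pos hc, if_neg (by omega)]
        · rw [if_neg hc, if_pos (by omega)]
          have hperm : (b :: t).Perm (a :: rest) := by
            have h := PySem.List.sorted_perm (b :: t) (fun x : Int => x) false
            rw [hs] at h; exact h.symm
          have hermperm : rest.Perm ((b :: t).erase a) := by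
            have h := hperm.erase a
            simpa using h.symm
          have hpw : rest.Pairwise (fun x y : Int => x ≤ y) := by
            have h := PySem.List.sorted_pairwise (b :: t) (fun x : Int => x)
            rw [hs] at h
            exact (List.pairwise_cons.mp h).2
          have hsr : PySem.List.sorted ((b :: t).erase a) (fun x => x) false = rest :=
            PySem.List.sorted_id_eq_of_perm_of_pairwise _ _ hermperm hpw
          have hlen : ((b :: t).erase a).length ≤ fuel := by
            rw [List.length_erase_of_mem (hma ▸ hmem)]
            simp at hx ⊢
            omega
          rw [ih _ hlen, hsr]

-- ===== VERDICT (by name: the statement is the Claim_ definition above) =====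
theorem max_apple_spec : Claim_equal_max_apple := by
  intro A _ _
  unfold Spec_max_apple max_apple max_apple_alt
  exact (selB_eq_loopA _ _ _ le_rfl 0 0).symm
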